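-- pv_equiv track=rewrite | github.com/cristianBrianLFW/Leetcode | python/medium/2536. Increment Submatrices by One/main.py | rangeAddQueries5
-- ===== SOURCE A (Python) =====
-- from typing import List
--
-- def rangeAddQueries5 (n: int, queries: List[List[int]]) -> List[List[int]]:
--
--     m = []
--
--     for i in range ( n + 1):
--         L = []
--         for j in range ( n + 1 ):
--             L.append ( 0 )
--         m.append ( L )
--
--
--     for query in queries:
--         r1, c1, r2, c2 = query [ 0 ], query [ 1 ], query [ 2 ], query [ 3 ]
--
--         m [ r1 ][ c1 ] += 1
--         m [ r1 ][ c2 + 1] -= 1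
--         m [ r2 + 1][ c1 ] -= 1
--         m [ r2 + 1 ][ c2 + 1] += 1
--
--     m2 = []
--
--     for i in range ( n ):
--         L2 = []
--         for j in range ( n ):
--             if ( i > 0 ):
--                 m [ i ][ j ] += m [ i - 1][ j ]
--             if ( j > 0 ):
--                 m [ i ][ j ] += m [ i ][ j - 1]
--             if ( i > 0 ) and ( j > 0 ):
--                 m [ i ][ j ] -= m [ i - 1][ j - 1]
--
--             L2.append ( m [ i ][ j ])
--         m2.append( L2 )
--
--     return m2
-- ===== SOURCE B (Python) =====
-- from typing import List
--
-- def rangeAddQueries5(n: int, queries: List[List[int]]) -> List[List[int]]: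
--     diff = [[0] * (n + 1) for _ in range(n + 1)]
--     for q in queries:
--         r1, c1, r2, c2 = q[0], q[1], q[2], q[3]
--         diff[r1][c1] += 1
--         diff[r1][c2 + 1] -= 1
--         diff[r2 + 1][c1] -= 1
--         diff[r2 + 1][c2 + 1] += 1
--     out = []
--     col = [0] * n
--     for i in range(n):
--         row = []
--         s = 0
--         for j in range(n):
--             col[j] += diff[i][j]
--             s += col[j]
--             row.append(s)
--         out.append(row)
--     return out
-- ===== Notes on version B (the rewrite author's own statement) =====
-- stated objective: alternative
-- what changed: B records the same four difference marks per query but replaces A's in-place 2D inclusion-exclusion reconstruction (three conditional reads/writes per cell into the padded matrix) by a streaming pass that keeps running column totals and a row running sum and never mutates the difference matrix.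
import Mathlib
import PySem

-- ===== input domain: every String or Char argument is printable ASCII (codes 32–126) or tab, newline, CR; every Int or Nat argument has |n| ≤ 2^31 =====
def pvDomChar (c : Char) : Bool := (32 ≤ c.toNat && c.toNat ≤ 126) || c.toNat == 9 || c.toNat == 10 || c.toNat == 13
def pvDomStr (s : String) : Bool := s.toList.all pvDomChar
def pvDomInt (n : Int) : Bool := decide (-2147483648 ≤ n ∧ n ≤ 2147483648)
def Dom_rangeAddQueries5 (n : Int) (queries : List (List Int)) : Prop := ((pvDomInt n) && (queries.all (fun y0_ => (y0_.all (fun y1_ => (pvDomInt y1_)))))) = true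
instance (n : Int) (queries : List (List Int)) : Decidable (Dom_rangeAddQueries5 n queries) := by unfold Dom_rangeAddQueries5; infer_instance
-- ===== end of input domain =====

-- B keeps the padded difference marks but replaces A's in-place 2D inclusion–exclusion
-- reconstruction by a streaming pass (running column totals plus a row running sum).

-- shared cell primitives: m[i][j] read and `m[i][j] += δ` (Python index semantics,
-- including negative-index wraparound, via PySem's pyGetD/pySetD)
def pvGet (m : List (List Int)) (i j : Int) : Int :=
  PySem.List.pyGetD (PySem.List.pyGetD m i []) j 0

def pvBump (m : List (List Int)) (i j δ : Int) : List (List Int) :=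
  PySem.List.pySetD m i (PySem.List.pySetD (PySem.List.pyGetD m i []) j (pvGet m i j + δ))

-- the four difference marks of one query (this loop body is identical in A and in B)
def markQuery (m : List (List Int)) (query : List Int) : List (List Int) :=
  let r1 := PySem.List.pyGetD query 0 0
  let c1 := PySem.List.pyGetD query 1 0
  let r2 := PySem.List.pyGetD query 2 0
  let c2 := PySem.List.pyGetD query 3 0
  pvBump (pvBump (pvBump (pvBump m r1 c1 1) r1 (c2+1) (-1)) (r2+1) c1 (-1)) (r2+1) (c2+1) 1

-- ===== PORT A =====
-- the (n+1)×(n+1) zero matrix, built by appends as in the Python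
def aInit (n : Int) : List (List Int) :=
  (PySem.List.pyRange 0 (n+1)).foldl (fun m _ =>
    m ++ [(PySem.List.pyRange 0 (n+1)).foldl (fun L _ => L ++ [(0:Int)]) []]) []

-- body of the inner prefix-sum loop: state (m, L2)
def aCell (i : Int) (st2 : List (List Int) × List Int) (j : Int) : List (List Int) × List Int :=
  let m := st2.1
  let m := if 0 < i then pvBump m i j (pvGet m (i-1) j) else m
  let m := if 0 < j then pvBump m i j (pvGet m i (j-1)) else m
  let m := if 0 < i ∧ 0 < j then pvBump m i j (-(pvGet m (i-1) (j-1))) else m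
  (m, st2.2 ++ [pvGet m i j])

-- body of the outer prefix-sum loop: state (m, m2)
def aRow (n : Int) (st : List (List Int) × List (List Int)) (i : Int) :
    List (List Int) × List (List Int) :=
  let inner := (PySem.List.pyRange 0 n).foldl (aCell i) (st.1, [])
  (inner.1, st.2 ++ [inner.2])

def rangeAddQueries5 (n : Int) (queries : List (List Int)) : List (List Int) :=
  ((PySem.List.pyRange 0 n).foldl (aRow n) (queries.foldl markQuery (aInit n), [])).2

-- ===== PORT B =====
-- inner loop of B: col[j] += diff[i][j]; s += col[j]; row.append(s); state (col, s, row)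
def bCell (diff : List (List Int)) (i : Int) (st2 : List Int × Int × List Int) (j : Int) :
    List Int × Int × List Int :=
  let col := PySem.List.pySetD st2.1 j (PySem.List.pyGetD st2.1 j 0 + pvGet diff i j)
  let s := st2.2.1 + PySem.List.pyGetD col j 0
  (col, s, st2.2.2 ++ [s])

-- outer loop of B: one output row per grid row; state (col, out)
def bRow (diff : List (List Int)) (n : Int) (st : List Int × List (List Int)) (i : Int) :
    List Int × List (List Int) :=
  let inner := (PySem.List.pyRange 0 n).foldl (bCell diff i) (st.1, 0, [])
  (inner.1, st.2 ++ [inner.2.2])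

def rangeAddQueries5_alt (n : Int) (queries : List (List Int)) : List (List Int) :=
  let diff0 : List (List Int) :=
    (PySem.List.pyRange 0 (n+1)).map (fun _ => (PySem.List.pyRange 0 (n+1)).map (fun _ => (0:Int)))
  let diff := queries.foldl markQuery diff0
  ((PySem.List.pyRange 0 n).foldl (bRow diff n)
    ((PySem.List.pyRange 0 n).map (fun _ => (0:Int)), [])).2

-- ===== PRECONDITION & SPEC =====
-- a Python index into the padded (n+1)-sized axis that does not raise (wraparound allowed)
def inR (n x : Int) : Prop := -(n+1) ≤ x ∧ x ≤ n
-- a query A survives: long enough, and all four marks land inside the padded grid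
def okq (n : Int) (q : List Int) : Prop :=
  4 ≤ q.length ∧ inR n (q.getD 0 0) ∧ inR n (q.getD 1 0) ∧
  inR n (q.getD 2 0 + 1) ∧ inR n (q.getD 3 0 + 1)

-- Pre_ is exactly the condition under which the Python A returns normally (it excludes only
-- inputs on which A raises: queries shorter than 4, marks outside the padded grid, or n < 0
-- with a nonempty query list).
def Pre_rangeAddQueries5 (n : Int) (queries : List (List Int)) : Prop :=
  (0 ≤ n ∨ queries = []) ∧ ∀ q ∈ queries, okq n q
instance (n : Int) (queries : List (List Int)) : Decidable (Pre_rangeAddQueries5 n queries) := by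
  unfold Pre_rangeAddQueries5 okq inR; infer_instance

def pvWitness_rangeAddQueries5 : Int × List (List Int) := (3, [[1, 1, 2, 2], [0, 0, 1, 1]])

def Spec_rangeAddQueries5 (n : Int) (queries : List (List Int)) (out : List (List Int)) : Prop := out = rangeAddQueries5_alt n queries
instance (n : Int) (queries : List (List Int)) (out : List (List Int)) : Decidable (Spec_rangeAddQueries5 n queries out) := by unfold Spec_rangeAddQueries5; infer_instance

-- ===== CLAIM (what is proved, stated in full; the proofs are below) =====
def Claim_equal_rangeAddQueries5 : Prop := ∀ (n : Int) (queries : List (List Int)), Dom_rangeAddQueries5 n queries → Pre_rangeAddQueries5 n queries → Spec_rangeAddQueries5 n queries (rangeAddQueries5 n queries)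

-- ===== LEMMAS AND PROOFS =====

-- "m is an R×R matrix whose in-range cells are f"
def pvRep (m : List (List Int)) (R : Nat) (f : Int → Int → Int) : Prop :=
  m.length = R ∧ (∀ (k : Nat) (h : k < m.length), m[k].length = R) ∧
  (∀ i j : Int, 0 ≤ i → i < (R:Int) → 0 ≤ j → j < (R:Int) → pvGet m i j = f i j)

def ptUpd (f : Int → Int → Int) (a b v : Int) : Int → Int → Int :=
  fun i j => if i = a ∧ j = b then v else f i j

-- the mixed state of A's in-place prefix pass: cells before (a,b) in scan order (and left of
-- column n) already hold C, the rest still hold D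
def mixf (n : Int) (C D : Int → Int → Int) (a b : Int) : Int → Int → Int :=
  fun i j => if (i < a ∨ (i = a ∧ j < b)) ∧ j < n then C i j else D i j


-- the wrapped (normalised, nonnegative) form of a Python index into an R-sized axis
def wrapI (R : Nat) (x : Int) : Int := if 0 ≤ x then x else x + R

-- the functional mirror of markQuery on an R×R grid-as-function
def markStep (R : Nat) (f : Int → Int → Int) (q : List Int) : Int → Int → Int :=
  let r1 := wrapI R (q.getD 0 0)
  let c1 := wrapI R (q.getD 1 0)
  let r2p := wrapI R (q.getD 2 0 + 1)
  let c2p := wrapI R (q.getD 3 0 + 1)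
  let f1 := ptUpd f r1 c1 (f r1 c1 + 1)
  let f2 := ptUpd f1 r1 c2p (f1 r1 c2p + (-1))
  let f3 := ptUpd f2 r2p c1 (f2 r2p c1 + (-1))
  ptUpd f3 r2p c2p (f3 r2p c2p + 1)

-- all marks of a query list, as a function
def mFn (R : Nat) (qs : List (List Int)) : Int → Int → Int :=
  qs.foldl (markStep R) (fun _ _ => 0)

-- inclusive 2D prefix sum of f over [0..i]×[0..j], and inclusive column prefix over [0..i]
def pref (f : Int → Int → Int) (i j : Int) : Int :=
  ((List.range (i+1).toNat).map (fun (x : Nat) =>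
    ((List.range (j+1).toNat).map (fun (y : Nat) => f ↑x ↑y)).sum)).sum
def colPre (f : Int → Int → Int) (i j : Int) : Int :=
  ((List.range (i+1).toNat).map (fun (x : Nat) => f ↑x j)).sum

-- the common target matrix
def tgt (n : Int) (qs : List (List Int)) : List (List Int) :=
  (List.range n.toNat).map (fun (i : Nat) =>
    (List.range n.toNat).map (fun (j : Nat) => pref (mFn (n.toNat+1) qs) ↑i ↑j))

lemma pvRep_congr {m R f} (h : pvRep m R f) {g}
    (hfg : ∀ i j : Int, 0 ≤ i → i < (R:Int) → 0 ≤ j → j < (R:Int) → f i j = g i j) :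
    pvRep m R g := by
  refine ⟨h.1, h.2.1, fun i j hi hi' hj hj' => ?_⟩
  rw [h.2.2 i j hi hi' hj hj', hfg i j hi hi' hj hj']

lemma ptUpd_self (f : Int → Int → Int) (a b v : Int) : ptUpd f a b v a b = v := by
  unfold ptUpd; simp

lemma ptUpd_ne (f : Int → Int → Int) {a b x y : Int} (v : Int) (h : ¬ (x = a ∧ y = b)) :
    ptUpd f a b v x y = f x y := by
  unfold ptUpd; rw [if_neg h]

lemma pvGet_elem {m : List (List Int)} {R : Nat} (hl : m.length = R)
    (hrow : ∀ (k : Nat) (h : k < m.length), m[k].length = R)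
    {i j : Int} (hi : 0 ≤ i) (hi' : i < (R:Int)) (hj : 0 ≤ j) (hj' : j < (R:Int)) :
    pvGet m i j = (m[i.toNat]'(by omega)).getD j.toNat 0 := by
  have h1 : i.toNat < m.length := by omega
  have h2 : (m[i.toNat]'h1).length = R := hrow _ h1
  unfold pvGet
  rw [PySem.List.pyGetD_eq_getElem m [] hi (by exact_mod_cast by omega : i < (m.length:Int)),
    PySem.List.pyGetD_eq_getElem _ 0 hj (by rw [h2]; exact_mod_cast hj'),
    List.getD_eq_getElem _ _ (by omega)]

lemma pvRep_bump {m R f} (h : pvRep m R f) {a b : Int} (δ : Int)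
    (ha : 0 ≤ a) (ha' : a < (R:Int)) (hb : 0 ≤ b) (hb' : b < (R:Int)) :
    pvRep (pvBump m a b δ) R (ptUpd f a b (f a b + δ)) := by
  obtain ⟨hl, hrow, hval⟩ := h
  have haN : a.toNat < m.length := by omega
  have hrA : (m[a.toNat]'haN).length = R := hrow _ haN
  have hbN : b.toNat < (m[a.toNat]'haN).length := by omega
  have hbump : pvBump m a b δ
      = m.set a.toNat ((m[a.toNat]'haN).set b.toNat (pvGet m a b + δ)) := by
    unfold pvBump
    rw [PySem.List.pyGetD_eq_getElem m [] ha (by exact_mod_cast by omega : a < (m.length:Int)),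
      PySem.List.pySetD_of_nonneg _ _ hb, PySem.List.pySetD_of_nonneg _ _ ha]
  rw [hbump]
  refine ⟨by simpa using hl, ?_, ?_⟩
  · intro k hk
    have hk' : k < m.length := by simpa using hk
    rw [List.getElem_set]
    split
    · simpa using hrA
    · exact hrow k hk'
  · intro i j hi hi' hj hj'
    have hiN : i.toNat < m.length := by omega
    have hrI : (m[i.toNat]'hiN).length = R := hrow _ hiN
    rw [pvGet_elem (by simpa using hl)
      (by intro k hk
          have hk' : k < m.length := by simpa using hk
          rw [List.getElem_set]; split
          · simpa using hrA
          · exact hrow k hk') hi hi' hj hj']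
    rw [List.getElem_set]
    unfold ptUpd
    by_cases hia : i = a
    · subst hia
      rw [if_pos (by omega)]
      by_cases hjb : j = b
      · subst hjb
        rw [List.getD_eq_getElem _ _ (by simpa using hbN), List.getElem_set, if_pos (by omega),
          if_pos ⟨rfl, rfl⟩, hval i j hi hi' hj hj']
      · rw [if_neg (by simp [hjb]),
          List.getD_eq_getElem _ _ (by simp; omega), List.getElem_set, if_neg (by omega)]
        have := hval i j hi hi' hj hj'
        rw [pvGet_elem hl hrow hi hi' hj hj', List.getD_eq_getElem _ _ (by omega)] at this
        exact this
    · rw [if_neg (by omega), if_neg (by simp [hia])]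
      have := hval i j hi hi' hj hj'
      rw [pvGet_elem hl hrow hi hi' hj hj'] at this
      exact this

lemma pvRep_mk (R : Nat) (f : Int → Int → Int) :
    pvRep ((List.range R).map (fun (i : Nat) => (List.range R).map (fun (j : Nat) => f ↑i ↑j))) R f := by
  refine ⟨by simp, by intro k hk; simp, ?_⟩
  intro i j hi hi' hj hj'
  rw [pvGet_elem (by simp) (by intro k hk; simp) hi hi' hj hj']
  simp only [List.getElem_map, List.getElem_range]
  rw [List.getD_eq_getElem _ _ (by simp; omega)]
  simp [Int.toNat_of_nonneg hi, Int.toNat_of_nonneg hj]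

lemma aInit_rep {n : Int} (hn : 0 ≤ n) : pvRep (aInit n) (n.toNat+1) (fun _ _ => 0) := by
  have hlen : (n + 1 - 0).toNat = n.toNat + 1 := by omega
  have he : aInit n = (List.range (n.toNat+1)).map
      (fun (_ : Nat) => (List.range (n.toNat+1)).map (fun (_ : Nat) => (0:Int))) := by
    unfold aInit
    rw [PySem.List.foldl_append_singleton_eq_map
        (fun (_ : Int) => (PySem.List.pyRange 0 (n+1)).foldl (fun L _ => L ++ [(0:Int)]) []),
      PySem.List.foldl_append_singleton_eq_map (fun (_ : Int) => (0:Int))]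
    simp only [PySem.List.pyRange_one, List.map_map, Function.comp_def]
    have h : (n + 1 - 0).toNat = n.toNat + 1 := by omega
    rw [h]
    simp
  rw [he]
  exact pvRep_mk (n.toNat+1) (fun _ _ => 0)

-- ===== wrap lemmas: Python indexing with possibly-negative indices =====

lemma wrapI_bounds {R : Nat} {x : Int} (h1 : -(R:Int) ≤ x) (h2 : x < (R:Int)) :
    0 ≤ wrapI R x ∧ wrapI R x < (R:Int) := by
  unfold wrapI; split_ifs <;> omega

lemma pyIdx_wrap {L : Nat} {x : Int} (h1 : -(L:Int) ≤ x) (h2 : x < (L:Int)) :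
    PySem.List.pyIdx? L x = some (wrapI L x).toNat := by
  unfold PySem.List.pyIdx? wrapI
  split_ifs <;> first | rfl | (congr 1; omega)

lemma pyGetD_wrap {α : Type} (xs : List α) {R : Nat} (hL : xs.length = R) {x : Int} (d : α)
    (h1 : -(R:Int) ≤ x) (h2 : x < (R:Int)) :
    PySem.List.pyGetD xs x d = PySem.List.pyGetD xs (wrapI R x) d := by
  subst hL
  have hw := wrapI_bounds h1 h2
  unfold PySem.List.pyGetD PySem.List.pyGet?
  rw [pyIdx_wrap h1 h2, pyIdx_wrap (by omega) (by omega)]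
  have : wrapI xs.length (wrapI xs.length x) = wrapI xs.length x := by
    unfold wrapI; split_ifs <;> omega
  rw [this]

lemma pySetD_wrap {α : Type} (xs : List α) {R : Nat} (hL : xs.length = R) {x : Int} (v : α)
    (h1 : -(R:Int) ≤ x) (h2 : x < (R:Int)) :
    PySem.List.pySetD xs x v = PySem.List.pySetD xs (wrapI R x) v := by
  subst hL
  have hw := wrapI_bounds h1 h2
  unfold PySem.List.pySetD PySem.List.pySet?
  rw [pyIdx_wrap h1 h2, pyIdx_wrap (by omega) (by omega)]
  have : wrapI xs.length (wrapI xs.length x) = wrapI xs.length x := by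
    unfold wrapI; split_ifs <;> omega
  rw [this]

lemma pvBump_wrap {m : List (List Int)} {R : Nat} (hl : m.length = R)
    (hrow : ∀ (k : Nat) (h : k < m.length), m[k].length = R)
    {a b : Int} (δ : Int) (ha1 : -(R:Int) ≤ a) (ha2 : a < (R:Int))
    (hb1 : -(R:Int) ≤ b) (hb2 : b < (R:Int)) :
    pvBump m a b δ = pvBump m (wrapI R a) (wrapI R b) δ := by
  have hwa := wrapI_bounds ha1 ha2
  have hrowlen' : (PySem.List.pyGetD m (wrapI R a) []).length = R := by
    rw [PySem.List.pyGetD_eq_getElem m [] hwa.1 (by omega)]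
    exact hrow _ (by omega)
  unfold pvBump pvGet
  rw [pyGetD_wrap m hl [] ha1 ha2, pySetD_wrap m hl _ ha1 ha2,
    pyGetD_wrap _ hrowlen' 0 hb1 hb2, pySetD_wrap _ hrowlen' _ hb1 hb2]

-- ===== marks phase =====

lemma markQuery_rep {n : Int} {q : List Int} (hn : 0 ≤ n) (hq : okq n q)
    {m f} (h : pvRep m (n.toNat+1) f) :
    pvRep (markQuery m q) (n.toNat+1) (markStep (n.toNat+1) f q) := by
  obtain ⟨hlen, hr1, hc1, hr2, hc2⟩ := hq
  obtain ⟨hir1, hir1'⟩ := hr1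
  obtain ⟨hic1, hic1'⟩ := hc1
  obtain ⟨hir2, hir2'⟩ := hr2
  obtain ⟨hic2, hic2'⟩ := hc2
  have hR : ((n.toNat + 1 : Nat) : Int) = n + 1 := by omega
  have he : markQuery m q =
      pvBump (pvBump (pvBump (pvBump m (q.getD 0 0) (q.getD 1 0) 1)
        (q.getD 0 0) (q.getD 3 0 + 1) (-1)) (q.getD 2 0 + 1) (q.getD 1 0) (-1))
        (q.getD 2 0 + 1) (q.getD 3 0 + 1) 1 := by
    unfold markQuery
    simp only [PySem.List.pyGetD_ofNat']
  rw [he]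
  set R := n.toNat + 1 with hRdef
  have hw1 := wrapI_bounds (R := R) (x := q.getD 0 0) (by omega) (by omega)
  have hw2 := wrapI_bounds (R := R) (x := q.getD 1 0) (by omega) (by omega)
  have hw3 := wrapI_bounds (R := R) (x := q.getD 2 0 + 1) (by omega) (by omega)
  have hw4 := wrapI_bounds (R := R) (x := q.getD 3 0 + 1) (by omega) (by omega)
  rw [pvBump_wrap h.1 h.2.1 1 (by omega) (by omega) (by omega) (by omega)]
  have h1 := pvRep_bump (a := wrapI R (q.getD 0 0)) (b := wrapI R (q.getD 1 0)) h 1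
    hw1.1 hw1.2 hw2.1 hw2.2
  rw [pvBump_wrap h1.1 h1.2.1 (-1) (by omega) (by omega) (by omega) (by omega)]
  have h2 := pvRep_bump (a := wrapI R (q.getD 0 0)) (b := wrapI R (q.getD 3 0 + 1)) h1 (-1)
    hw1.1 hw1.2 hw4.1 hw4.2
  rw [pvBump_wrap h2.1 h2.2.1 (-1) (by omega) (by omega) (by omega) (by omega)]
  have h3 := pvRep_bump (a := wrapI R (q.getD 2 0 + 1)) (b := wrapI R (q.getD 1 0)) h2 (-1)
    hw3.1 hw3.2 hw2.1 hw2.2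
  rw [pvBump_wrap h3.1 h3.2.1 1 (by omega) (by omega) (by omega) (by omega)]
  have h4 := pvRep_bump (a := wrapI R (q.getD 2 0 + 1)) (b := wrapI R (q.getD 3 0 + 1)) h3 1
    hw3.1 hw3.2 hw4.1 hw4.2
  exact h4

lemma markFold_rep {n : Int} {qs : List (List Int)} (hn : 0 ≤ n) (hq : ∀ q ∈ qs, okq n q) :
    ∀ (m : List (List Int)) (f), pvRep m (n.toNat+1) f →
      pvRep (qs.foldl markQuery m) (n.toNat+1) (qs.foldl (markStep (n.toNat+1)) f) := by
  induction qs with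
  | nil => intro m f h; exact h
  | cons q qs ih =>
    intro m f h
    exact ih (fun q hq' => hq q (by simp [hq'])) _ _ (markQuery_rep hn (hq q (by simp)) h)

-- ===== prefix-sum algebra =====

lemma pref_bot (f : Int → Int → Int) (i : Int) : pref f i (-1) = 0 := by
  unfold pref
  norm_num

lemma pref_bot_row (f : Int → Int → Int) (j : Int) : pref f (-1) j = 0 := by
  unfold pref
  norm_num

lemma colPre_bot (f : Int → Int → Int) (j : Int) : colPre f (-1) j = 0 := by
  unfold colPre
  norm_num

lemma colPre_succ (f : Int → Int → Int) {i : Int} (hi : 0 ≤ i) (j : Int) :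
    colPre f i j = colPre f (i-1) j + f i j := by
  unfold colPre
  rw [show (i+1).toNat = (i-1+1).toNat + 1 by omega, List.range_succ, List.map_append,
    List.sum_append]
  simp only [List.map_cons, List.map_nil, List.sum_cons, List.sum_nil, add_zero]
  rw [show (((i-1+1).toNat : Nat) : Int) = i from by omega]

lemma pref_succ_col (f : Int → Int → Int) (i : Int) {j : Int} (hj : 0 ≤ j) :
    pref f i j = pref f i (j-1) + colPre f i j := by
  unfold pref colPre
  have hrow : ∀ x : Nat, ((List.range (j+1).toNat).map (fun (y : Nat) => f ↑x ↑y)).sum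
      = ((List.range (j-1+1).toNat).map (fun (y : Nat) => f ↑x ↑y)).sum + f ↑x j := by
    intro x
    rw [show (j+1).toNat = (j-1+1).toNat + 1 by omega, List.range_succ, List.map_append,
      List.sum_append]
    simp only [List.map_cons, List.map_nil, List.sum_cons, List.sum_nil, add_zero]
    rw [show (((j-1+1).toNat : Nat) : Int) = j from by omega]
  calc ((List.range (i+1).toNat).map (fun (x : Nat) =>
          ((List.range (j+1).toNat).map (fun (y : Nat) => f ↑x ↑y)).sum)).sum
      = ((List.range (i+1).toNat).map (fun (x : Nat) =>
          ((List.range (j-1+1).toNat).map (fun (y : Nat) => f ↑x ↑y)).sum + f ↑x j)).sum := by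
        congr 1; exact List.map_congr_left (fun x _ => hrow x)
    _ = _ := by
        rw [PySem.List.sum_map_add_int]

lemma pref_rec (f : Int → Int → Int) {i j : Int} (hi : 0 ≤ i) (hj : 0 ≤ j) :
    f i j = pref f i j - pref f (i-1) j - pref f i (j-1) + pref f (i-1) (j-1) := by
  have h1 := pref_succ_col f i hj
  have h2 := pref_succ_col f (i-1) hj
  have h3 := colPre_succ f hi j
  linarith


-- ===== A's in-place prefix pass (generic in C, D) =====

lemma pvRep_bump_if {m R f} (h : pvRep m R f) (c : Prop) [Decidable c] {a b : Int} (δ : Int)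
    (ha : 0 ≤ a) (ha' : a < (R:Int)) (hb : 0 ≤ b) (hb' : b < (R:Int)) :
    pvRep (if c then pvBump m a b δ else m) R (ptUpd f a b (f a b + if c then δ else 0)) := by
  by_cases hc : c
  · rw [if_pos hc, if_pos hc]
    exact pvRep_bump h δ ha ha' hb hb'
  · rw [if_neg hc, if_neg hc]
    refine pvRep_congr h ?_
    intro x y _ _ _ _
    unfold ptUpd
    split_ifs with hxy
    · obtain ⟨rfl, rfl⟩ := hxy; ring
    · rfl

lemma aCell_step {n : Int} (hn : 0 ≤ n) {C D : Int → Int → Int}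
    (hrec : ∀ i j : Int, 0 ≤ i → 0 ≤ j → D i j = C i j - C (i-1) j - C i (j-1) + C (i-1) (j-1))
    (hC0r : ∀ j, C (-1) j = 0) (hC0c : ∀ i, C i (-1) = 0)
    {a b : Int} (ha : 0 ≤ a) (han : a < n) (hb : 0 ≤ b) (hbn : b < n)
    {m : List (List Int)} {acc : List Int} (hm : pvRep m (n.toNat+1) (mixf n C D a b)) :
    pvRep (aCell a (m, acc) b).1 (n.toNat+1) (mixf n C D a (b+1)) ∧
    (aCell a (m, acc) b).2 = acc ++ [C a b] := by
  have hDab : mixf n C D a b a b = D a b := by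
    unfold mixf; rw [if_neg (by omega)]
  -- step 1 : m[i][j] += m[i-1][j] (when 0 < i)
  have h1 := pvRep_bump_if hm (0 < a) (pvGet m (a-1) b) ha (by omega) hb (by omega)
  have e1 : mixf n C D a b a b + (if 0 < a then pvGet m (a-1) b else 0)
      = D a b + (if 0 < a then C (a-1) b else 0) := by
    rw [hDab]
    by_cases h0a : 0 < a
    · rw [if_pos h0a, if_pos h0a,
        hm.2.2 (a-1) b (by omega) (by omega) hb (by omega)]
      unfold mixf
      rw [if_pos (show (a - 1 < a ∨ (a - 1 = a ∧ b < b)) ∧ b < n by omega)]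
    · rw [if_neg h0a, if_neg h0a]
  rw [e1] at h1
  -- step 2 : m[i][j] += m[i][j-1] (when 0 < j)
  have h2 := pvRep_bump_if h1 (0 < b)
    (pvGet (if 0 < a then pvBump m a b (pvGet m (a-1) b) else m) a (b-1))
    ha (by omega) hb (by omega)
  have e2 : ptUpd (mixf n C D a b) a b (D a b + (if 0 < a then C (a-1) b else 0)) a b
      + (if 0 < b then
          pvGet (if 0 < a then pvBump m a b (pvGet m (a-1) b) else m) a (b-1) else 0)
      = D a b + (if 0 < a then C (a-1) b else 0) + (if 0 < b then C a (b-1) else 0) := by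
    rw [ptUpd_self]
    by_cases h0b : 0 < b
    · rw [if_pos h0b, if_pos h0b,
        h1.2.2 a (b-1) ha (by omega) (by omega) (by omega),
        ptUpd_ne _ _ (by omega)]
      unfold mixf
      rw [if_pos (show (a < a ∨ (a = a ∧ b - 1 < b)) ∧ b - 1 < n by omega)]
    · rw [if_neg h0b, if_neg h0b]
  rw [e2] at h2
  -- step 3 : m[i][j] -= m[i-1][j-1] (when 0 < i and 0 < j)
  have h3 := pvRep_bump_if h2 (0 < a ∧ 0 < b)
    (-(pvGet (if 0 < b then
        pvBump (if 0 < a then pvBump m a b (pvGet m (a-1) b) else m) a b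
          (pvGet (if 0 < a then pvBump m a b (pvGet m (a-1) b) else m) a (b-1))
      else (if 0 < a then pvBump m a b (pvGet m (a-1) b) else m)) (a-1) (b-1)))
    ha (by omega) hb (by omega)
  have e3 : ptUpd (ptUpd (mixf n C D a b) a b (D a b + (if 0 < a then C (a-1) b else 0))) a b
        (D a b + (if 0 < a then C (a-1) b else 0) + (if 0 < b then C a (b-1) else 0)) a b
      + (if 0 < a ∧ 0 < b then
          (-(pvGet (if 0 < b then
              pvBump (if 0 < a then pvBump m a b (pvGet m (a-1) b) else m) a b
                (pvGet (if 0 < a then pvBump m a b (pvGet m (a-1) b) else m) a (b-1))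
            else (if 0 < a then pvBump m a b (pvGet m (a-1) b) else m)) (a-1) (b-1))) else 0)
      = C a b := by
    rw [ptUpd_self]
    have hD := hrec a b ha hb
    by_cases h0a : 0 < a
    · by_cases h0b : 0 < b
      · rw [if_pos h0a, if_pos h0b, if_pos ⟨h0a, h0b⟩,
          h2.2.2 (a-1) (b-1) (by omega) (by omega) (by omega) (by omega),
          ptUpd_ne _ _ (by omega), ptUpd_ne _ _ (by omega)]
        have : mixf n C D a b (a-1) (b-1) = C (a-1) (b-1) := by
          unfold mixf
          rw [if_pos (show (a - 1 < a ∨ (a - 1 = a ∧ b - 1 < b)) ∧ b - 1 < n by omega)]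
        rw [this]; linarith
      · rw [if_pos h0a, if_neg h0b, if_neg (by tauto)]
        have hb0 : b = 0 := by omega
        subst hb0
        have ec : (0:Int) - 1 = -1 := by ring
        rw [ec, hC0c, hC0c] at hD
        linarith
    · by_cases h0b : 0 < b
      · rw [if_neg h0a, if_pos h0b, if_neg (by tauto)]
        have ha0 : a = 0 := by omega
        subst ha0
        have ec : (0:Int) - 1 = -1 := by ring
        rw [ec, hC0r, hC0r] at hD
        linarith
      · rw [if_neg h0a, if_neg h0b, if_neg (by tauto)]
        have ha0 : a = 0 := by omega
        have hb0 : b = 0 := by omega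
        subst ha0; subst hb0
        have ec : (0:Int) - 1 = -1 := by ring
        rw [ec, hC0r, hC0r, hC0c] at hD
        linarith
  rw [e3] at h3
  constructor
  · refine pvRep_congr h3 ?_
    intro x y hx hx' hy hy'
    by_cases hxy : x = a ∧ y = b
    · obtain ⟨rfl, rfl⟩ := hxy
      rw [ptUpd_self]
      unfold mixf
      rw [if_pos (show (x < x ∨ (x = x ∧ y < y + 1)) ∧ y < n by omega)]
    · rw [ptUpd_ne _ _ hxy, ptUpd_ne _ _ hxy, ptUpd_ne _ _ hxy]
      unfold mixf
      split_ifs <;> first | rfl | (exfalso; omega)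
  · show acc ++ [pvGet _ a b] = acc ++ [C a b]
    rw [h3.2.2 a b ha (by omega) hb (by omega), ptUpd_self]

lemma aInner_loop {n : Int} (hn : 0 ≤ n) {C D : Int → Int → Int}
    (hrec : ∀ i j : Int, 0 ≤ i → 0 ≤ j → D i j = C i j - C (i-1) j - C i (j-1) + C (i-1) (j-1))
    (hC0r : ∀ j, C (-1) j = 0) (hC0c : ∀ i, C i (-1) = 0)
    {a : Int} (ha : 0 ≤ a) (han : a < n)
    {m : List (List Int)} (hm : pvRep m (n.toNat+1) (mixf n C D a 0))
    (c : Nat) (hc : (c:Int) ≤ n) :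
    pvRep ((PySem.List.pyRange 0 (c:Int)).foldl (aCell a) (m, [])).1 (n.toNat+1)
        (mixf n C D a (c:Int)) ∧
    ((PySem.List.pyRange 0 (c:Int)).foldl (aCell a) (m, [])).2
      = (List.range c).map (fun (j : Nat) => C a ↑j) := by
  induction c with
  | zero =>
    rw [PySem.List.pyRange_one_eq_nil (by omega)]
    exact ⟨hm, rfl⟩
  | succ c ih =>
    have hc' : (c:Int) ≤ n := by push_cast at hc ⊢; omega
    obtain ⟨ihR, ihS⟩ := ih hc'
    have hcast : ((c+1 : Nat) : Int) = (c:Int) + 1 := by push_cast; ring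
    rw [hcast, PySem.List.pyRange_one_succ_right (by positivity), List.foldl_append]
    have hstep := aCell_step (acc := ((PySem.List.pyRange 0 (c:Int)).foldl (aCell a) (m, [])).2)
      hn hrec hC0r hC0c ha han (by positivity : (0:Int) ≤ (c:Int))
      (by omega : (c:Int) < n) ihR
    constructor
    · exact hstep.1
    · rw [List.foldl_cons, List.foldl_nil]
      have : (((PySem.List.pyRange 0 (c:Int)).foldl (aCell a) (m, [])).1,
          ((PySem.List.pyRange 0 (c:Int)).foldl (aCell a) (m, [])).2)
          = (PySem.List.pyRange 0 (c:Int)).foldl (aCell a) (m, []) := rfl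
      rw [this] at hstep
      rw [hstep.2, ihS, List.range_succ, List.map_append]
      rfl

lemma aOuter_loop {n : Int} (hn : 0 ≤ n) {C D : Int → Int → Int}
    (hrec : ∀ i j : Int, 0 ≤ i → 0 ≤ j → D i j = C i j - C (i-1) j - C i (j-1) + C (i-1) (j-1))
    (hC0r : ∀ j, C (-1) j = 0) (hC0c : ∀ i, C i (-1) = 0)
    {m : List (List Int)} (hm : pvRep m (n.toNat+1) D)
    (r : Nat) (hr : (r:Int) ≤ n) :
    pvRep ((PySem.List.pyRange 0 (r:Int)).foldl (aRow n) (m, [])).1 (n.toNat+1)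
        (mixf n C D (r:Int) 0) ∧
    ((PySem.List.pyRange 0 (r:Int)).foldl (aRow n) (m, [])).2
      = (List.range r).map (fun (i : Nat) => (List.range n.toNat).map (fun (j : Nat) => C ↑i ↑j)) := by
  induction r with
  | zero =>
    rw [PySem.List.pyRange_one_eq_nil (by omega)]
    refine ⟨pvRep_congr hm ?_, rfl⟩
    intro x y hx hx' hy hy'
    unfold mixf
    rw [if_neg (by omega)]
  | succ r ih =>
    have hr' : (r:Int) ≤ n := by push_cast at hr ⊢; omega
    obtain ⟨ihR, ihS⟩ := ih hr'
    have hcast : ((r+1 : Nat) : Int) = (r:Int) + 1 := by push_cast; ring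
    rw [hcast, PySem.List.pyRange_one_succ_right (by positivity), List.foldl_append,
      List.foldl_cons, List.foldl_nil]
    have hnn : (PySem.List.pyRange 0 n) = (PySem.List.pyRange 0 ((n.toNat : Nat) : Int)) := by
      congr 1; omega
    set prev := (PySem.List.pyRange 0 (r:Int)).foldl (aRow n) (m, []) with hprev
    have hrow : aRow n prev (r:Int)
        = (((PySem.List.pyRange 0 ((n.toNat : Nat) : Int)).foldl (aCell (r:Int)) (prev.1, [])).1,
           prev.2 ++ [((PySem.List.pyRange 0 ((n.toNat : Nat) : Int)).foldl
              (aCell (r:Int)) (prev.1, [])).2]) := by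
      unfold aRow; rw [hnn]
    rw [hrow]
    have hmr : pvRep prev.1 (n.toNat+1) (mixf n C D (r:Int) 0) := ihR
    have hinner := aInner_loop hn hrec hC0r hC0c
      (by positivity : (0:Int) ≤ (r:Int)) (by omega : (r:Int) < n) hmr n.toNat (by omega)
    constructor
    · refine pvRep_congr hinner.1 ?_
      intro x y hx hx' hy hy'
      unfold mixf
      split_ifs <;> first | rfl | (exfalso; omega)
    · show prev.2 ++ _ = _
      rw [ihS, hinner.2, List.range_succ, List.map_append]
      rfl

lemma a_eq_tgt {n : Int} {qs : List (List Int)} (hn : 0 ≤ n) (hq : ∀ q ∈ qs, okq n q) :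
    rangeAddQueries5 n qs = tgt n qs := by
  have hD : pvRep (qs.foldl markQuery (aInit n)) (n.toNat+1) (mFn (n.toNat+1) qs) :=
    markFold_rep hn hq _ _ (aInit_rep hn)
  have houter := aOuter_loop hn
    (C := pref (mFn (n.toNat+1) qs)) (D := mFn (n.toNat+1) qs)
    (fun i j hi hj => pref_rec _ hi hj)
    (fun j => pref_bot_row _ j) (fun i => pref_bot _ i) hD n.toNat (by omega)
  unfold rangeAddQueries5 tgt
  have hnn : (PySem.List.pyRange 0 n) = (PySem.List.pyRange 0 ((n.toNat : Nat) : Int)) := by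
    congr 1; omega
  rw [hnn, houter.2]

-- ===== B's streaming pass =====

-- "l is an R-vector whose in-range cells are g"
def pvRep1 (l : List Int) (R : Nat) (g : Int → Int) : Prop :=
  l.length = R ∧ ∀ (j : Int), 0 ≤ j → j < (R:Int) → PySem.List.pyGetD l j 0 = g j

lemma pvRep1_congr {l R g} (h : pvRep1 l R g) {g'}
    (hgg : ∀ j : Int, 0 ≤ j → j < (R:Int) → g j = g' j) : pvRep1 l R g' :=
  ⟨h.1, fun j hj hj' => by rw [h.2 j hj hj', hgg j hj hj']⟩

lemma pvRep1_bump {l R g} (h : pvRep1 l R g) {j : Int} (δ : Int)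
    (hj : 0 ≤ j) (hj' : j < (R:Int)) :
    pvRep1 (PySem.List.pySetD l j (PySem.List.pyGetD l j 0 + δ)) R
      (fun y => if y = j then g j + δ else g y) := by
  obtain ⟨hl, hval⟩ := h
  have hjN : j.toNat < l.length := by omega
  rw [PySem.List.pySetD_of_nonneg _ _ hj]
  refine ⟨by simpa using hl, ?_⟩
  intro y hy hy'
  rw [PySem.List.pyGetD_eq_getElem _ 0 hy (by simpa using by omega : y < ((l.set j.toNat _).length : Int)),
    List.getElem_set]
  beta_reduce
  by_cases hyj : y = j
  · subst hyj
    rw [if_pos (by omega), if_pos rfl, hval y hy hy']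
  · rw [if_neg (by omega), if_neg hyj]
    have := hval y hy hy'
    rw [PySem.List.pyGetD_eq_getElem _ 0 hy (by omega)] at this
    exact this

-- the column state of B mid-row: columns left of b already include row a
def mixc (F : Int → Int → Int) (a b : Int) : Int → Int :=
  fun y => if y < b then colPre F a y else colPre F (a-1) y

lemma bCell_step {n : Int} {F : Int → Int → Int} {diff : List (List Int)}
    (hdiff : pvRep diff (n.toNat+1) F)
    {a b : Int} (ha : 0 ≤ a) (han : a < n) (hb : 0 ≤ b) (hbn : b < n)
    {col : List Int} {s : Int} {row : List Int}
    (hcol : pvRep1 col n.toNat (mixc F a b)) (hs : s = pref F a (b-1)) :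
    pvRep1 (bCell diff a (col, s, row) b).1 n.toNat (mixc F a (b+1)) ∧
    (bCell diff a (col, s, row) b).2.1 = pref F a b ∧
    (bCell diff a (col, s, row) b).2.2 = row ++ [pref F a b] := by
  have hget : pvGet diff a b = F a b :=
    hdiff.2.2 a b ha (by omega) hb (by omega)
  have hcolb : PySem.List.pyGetD col b 0 = colPre F (a-1) b := by
    rw [hcol.2 b hb (by omega)]
    unfold mixc; rw [if_neg (by omega)]
  have h1 := pvRep1_bump hcol (pvGet diff a b) hb (by omega)
  have hval : mixc F a b b + pvGet diff a b = colPre F a b := by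
    rw [hget]
    unfold mixc; rw [if_neg (by omega)]
    exact (colPre_succ F ha b).symm
  rw [hval] at h1
  have hread : PySem.List.pyGetD
      (PySem.List.pySetD col b (PySem.List.pyGetD col b 0 + pvGet diff a b)) b 0
      = colPre F a b := by
    rw [h1.2 b hb (by omega)]
    beta_reduce
    rw [if_pos rfl]
  refine ⟨?_, ?_, ?_⟩
  · refine pvRep1_congr h1 ?_
    intro y hy hy'
    beta_reduce
    by_cases hyb : y = b
    · subst hyb
      rw [if_pos rfl]
      unfold mixc
      rw [if_pos (by omega)]
    · rw [if_neg hyb]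
      unfold mixc
      split_ifs <;> first | rfl | (exfalso; omega)
  · show s + _ = _
    rw [hread, hs, (pref_succ_col F a hb).symm]
  · show row ++ [s + _] = _
    rw [hread, hs, (pref_succ_col F a hb).symm]

lemma bInner_loop {n : Int} {F : Int → Int → Int} {diff : List (List Int)}
    (hdiff : pvRep diff (n.toNat+1) F)
    {a : Int} (ha : 0 ≤ a) (han : a < n)
    {col : List Int} (hcol : pvRep1 col n.toNat (mixc F a 0))
    (c : Nat) (hc : (c:Int) ≤ n) :
    pvRep1 ((PySem.List.pyRange 0 (c:Int)).foldl (bCell diff a) (col, 0, [])).1 n.toNat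
      (mixc F a (c:Int)) ∧
    ((PySem.List.pyRange 0 (c:Int)).foldl (bCell diff a) (col, 0, [])).2.1
      = pref F a ((c:Int) - 1) ∧
    ((PySem.List.pyRange 0 (c:Int)).foldl (bCell diff a) (col, 0, [])).2.2
      = (List.range c).map (fun (j : Nat) => pref F a ↑j) := by
  induction c with
  | zero =>
    rw [PySem.List.pyRange_one_eq_nil (by omega)]
    exact ⟨hcol, by rw [show ((0:Nat):Int) - 1 = -1 by ring, pref_bot]; rfl, rfl⟩
  | succ c ih =>
    have hc' : (c:Int) ≤ n := by push_cast at hc ⊢; omega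
    obtain ⟨ihC, ihS, ihR⟩ := ih hc'
    have hcast : ((c+1 : Nat) : Int) = (c:Int) + 1 := by push_cast; ring
    rw [hcast, PySem.List.pyRange_one_succ_right (by positivity), List.foldl_append,
      List.foldl_cons, List.foldl_nil]
    set prev := (PySem.List.pyRange 0 (c:Int)).foldl (bCell diff a) (col, 0, []) with hprev
    have hpeta : prev = (prev.1, prev.2.1, prev.2.2) := rfl
    rw [hpeta]
    have hstep := bCell_step (row := prev.2.2) hdiff ha han
      (by positivity : (0:Int) ≤ (c:Int)) (by omega) ihC ihS
    refine ⟨hstep.1, ?_, ?_⟩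
    · rw [hstep.2.1]; congr 1; ring
    · rw [hstep.2.2, ihR, List.range_succ, List.map_append]
      rfl

lemma bOuter_loop {n : Int} {F : Int → Int → Int} {diff : List (List Int)}
    (hn : 0 ≤ n) (hdiff : pvRep diff (n.toNat+1) F)
    {col : List Int} (hcol : pvRep1 col n.toNat (fun y => colPre F (-1) y))
    (r : Nat) (hr : (r:Int) ≤ n) :
    pvRep1 ((PySem.List.pyRange 0 (r:Int)).foldl (bRow diff n) (col, [])).1 n.toNat
      (fun y => colPre F ((r:Int) - 1) y) ∧
    ((PySem.List.pyRange 0 (r:Int)).foldl (bRow diff n) (col, [])).2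
      = (List.range r).map (fun (i : Nat) => (List.range n.toNat).map (fun (j : Nat) => pref F ↑i ↑j)) := by
  induction r with
  | zero =>
    rw [PySem.List.pyRange_one_eq_nil (by omega)]
    refine ⟨pvRep1_congr hcol ?_, rfl⟩
    intro y _ _
    rw [show ((0:Nat):Int) - 1 = -1 by ring]
  | succ r ih =>
    have hr' : (r:Int) ≤ n := by push_cast at hr ⊢; omega
    obtain ⟨ihC, ihO⟩ := ih hr'
    have hcast : ((r+1 : Nat) : Int) = (r:Int) + 1 := by push_cast; ring
    rw [hcast, PySem.List.pyRange_one_succ_right (by positivity), List.foldl_append,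
      List.foldl_cons, List.foldl_nil]
    have hnn : (PySem.List.pyRange 0 n) = (PySem.List.pyRange 0 ((n.toNat : Nat) : Int)) := by
      congr 1; omega
    set prev := (PySem.List.pyRange 0 (r:Int)).foldl (bRow diff n) (col, []) with hprev
    have hrow : bRow diff n prev (r:Int)
        = (((PySem.List.pyRange 0 ((n.toNat : Nat) : Int)).foldl (bCell diff (r:Int))
              (prev.1, 0, [])).1,
           prev.2 ++ [((PySem.List.pyRange 0 ((n.toNat : Nat) : Int)).foldl (bCell diff (r:Int))
              (prev.1, 0, [])).2.2]) := by
      unfold bRow; rw [hnn]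
    rw [hrow]
    have hmix0 : pvRep1 prev.1 n.toNat (mixc F (r:Int) 0) := by
      refine pvRep1_congr ihC ?_
      intro y hy hy'
      unfold mixc; rw [if_neg (by omega)]
    have hinner := bInner_loop hdiff (by positivity : (0:Int) ≤ (r:Int)) (by omega)
      hmix0 n.toNat (by omega)
    constructor
    · refine pvRep1_congr hinner.1 ?_
      intro y hy hy'
      unfold mixc
      rw [if_pos (by omega), show (r:Int) + 1 - 1 = (r:Int) from by ring]
    · rw [ihO, hinner.2.2, List.range_succ, List.map_append]
      rfl

lemma b_eq_tgt {n : Int} {qs : List (List Int)} (hn : 0 ≤ n) (hq : ∀ q ∈ qs, okq n q) :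
    rangeAddQueries5_alt n qs = tgt n qs := by
  have hg0 : ((PySem.List.pyRange 0 (n+1)).map
        (fun _ => (PySem.List.pyRange 0 (n+1)).map (fun _ => (0:Int))))
      = (List.range (n.toNat+1)).map
        (fun (_ : Nat) => (List.range (n.toNat+1)).map (fun (_ : Nat) => (0:Int))) := by
    simp only [PySem.List.pyRange_one, List.map_map, Function.comp_def]
    have h : (n + 1 - 0).toNat = n.toNat + 1 := by omega
    rw [h]
  have hrep0 : pvRep ((PySem.List.pyRange 0 (n+1)).map
        (fun _ => (PySem.List.pyRange 0 (n+1)).map (fun _ => (0:Int)))) (n.toNat+1)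
        (fun _ _ => 0) := by
    rw [hg0]
    exact pvRep_mk (n.toNat+1) (fun _ _ => 0)
  have hdiff := markFold_rep hn hq _ _ hrep0
  have hcol0 : pvRep1 ((PySem.List.pyRange 0 n).map (fun _ => (0:Int))) n.toNat
      (fun y => colPre (mFn (n.toNat+1) qs) (-1) y) := by
    constructor
    · simp only [List.length_map, PySem.List.length_pyRange_one]
      omega
    · intro j hj hj'
      rw [PySem.List.pyGetD_eq_getElem _ 0 hj
        (by simp [PySem.List.pyRange_one]; omega)]
      simp [colPre_bot]
  unfold rangeAddQueries5_alt tgt mFn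
  have hnn : (PySem.List.pyRange 0 n) = (PySem.List.pyRange 0 ((n.toNat : Nat) : Int)) := by
    congr 1; omega
  show ((PySem.List.pyRange 0 n).foldl (bRow _ n)
      ((PySem.List.pyRange 0 n).map (fun _ => (0:Int)), [])).2 = _
  generalize hc0 : (PySem.List.pyRange 0 n).map (fun _ => (0:Int)) = col0
  rw [hc0] at hcol0
  have houter := bOuter_loop hn hdiff hcol0 n.toNat (by omega)
  rw [hnn, houter.2]

-- ===== VERDICT (by name: the statement is the Claim_ definition above) =====
theorem rangeAddQueries5_spec : Claim_equal_rangeAddQueries5 := by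
  intro n queries _ hpre
  unfold Spec_rangeAddQueries5
  obtain ⟨h0, hq⟩ := hpre
  by_cases hn : 0 ≤ n
  · rw [a_eq_tgt hn hq, b_eq_tgt hn hq]
  · have hq0 : queries = [] := h0.resolve_left hn
    subst hq0
    have h1 : n + 1 ≤ 0 := by omega
    have h2 : n ≤ 0 := by omega
    simp [rangeAddQueries5, rangeAddQueries5_alt, aInit,
      PySem.List.pyRange_one_eq_nil h1, PySem.List.pyRange_one_eq_nil h2]
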